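-- pv_equiv track=rewrite | github.com/NAICNO/wp7-UC6-multimodal-optimization | mmo/cma_ext/utilities/utils.py | zero_values_indices
-- ===== SOURCE A (Python) =====
-- def zero_values_indices(diffs):
--     """generate increasing index pairs (i, j) with all(diffs[i:j] == 0)."""
--     i = 0
--     while i < len(diffs):
--         if diffs[i] == 0:
--             j = i
--             while j < len(diffs) and diffs[j] == 0:
--                 j += 1
--             yield i, j
--             i = j + 1
--         else:
--             i += 1
-- ===== SOURCE B (Python) =====
-- def zero_values_indices(diffs):
--     """generate increasing index pairs (i, j) with all(diffs[i:j] == 0)."""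
--     start = None
--     for idx, x in enumerate(diffs):
--         if x == 0:
--             if start is None:
--                 start = idx
--         else:
--             if start is not None:
--                 yield start, idx
--                 start = None
--     if start is not None:
--         yield start, len(diffs)
-- ===== Notes on version B (the rewrite author's own statement) =====
-- stated objective: simpler
-- what changed: Replaced the nested inner while-loop with index jumping by a flat single-pass state machine over enumerate(diffs) that tracks the start of the currently open zero run and flushes it on a nonzero element or at end of input.
import Mathlib
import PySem

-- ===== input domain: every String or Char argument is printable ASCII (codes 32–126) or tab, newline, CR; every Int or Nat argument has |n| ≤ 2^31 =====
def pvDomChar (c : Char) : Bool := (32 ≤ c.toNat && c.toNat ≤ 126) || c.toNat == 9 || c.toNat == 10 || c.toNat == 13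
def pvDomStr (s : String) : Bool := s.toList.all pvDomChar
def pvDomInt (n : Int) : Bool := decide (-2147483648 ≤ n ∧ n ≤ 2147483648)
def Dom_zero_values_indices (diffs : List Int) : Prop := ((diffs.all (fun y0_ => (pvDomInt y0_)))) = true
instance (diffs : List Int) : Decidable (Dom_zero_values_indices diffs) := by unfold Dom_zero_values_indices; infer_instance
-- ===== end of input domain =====

-- B replaces A's nested inner while-loop and index jumping by a flat single-pass
-- state machine tracking the start of the open zero run (objective: simpler).


-- ===== PORT A =====
-- inner while loop: 'while j < len(diffs) and diffs[j] == 0: j += 1', returns final j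
def zviInner (diffs : List Int) (j : Nat) : Nat :=
  if _ : j < diffs.length then
    if diffs[j]! = 0 then zviInner diffs (j + 1) else j
  else j
termination_by diffs.length - j

theorem zviInner_ge (diffs : List Int) (j : Nat) : j ≤ zviInner diffs j := by
  unfold zviInner
  split
  · split
    · exact Nat.le_trans (Nat.le_succ j) (zviInner_ge diffs (j + 1))
    · exact Nat.le_refl j
  · exact Nat.le_refl j
termination_by diffs.length - j

-- outer while loop over index i
def zviOuter (diffs : List Int) (i : Nat) : List (Int × Int) :=
  if hi : i < diffs.length then
    if diffs[i]! = 0 then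
      let j := zviInner diffs i
      ((i : Int), (j : Int)) :: zviOuter diffs (j + 1)
    else zviOuter diffs (i + 1)
  else []
termination_by diffs.length - i
decreasing_by
  · have := zviInner_ge diffs i; omega
  · omega

def zero_values_indices (diffs : List Int) : List (Int × Int) :=
  zviOuter diffs 0

-- ===== PORT B =====
-- one step of the for loop: state = (start, yielded pairs so far)
def zviStep (st : Option Int × List (Int × Int)) (px : Int × Int) : Option Int × List (Int × Int) :=
  if px.2 = 0 then
    match st.1 with
    | none => (some px.1, st.2)
    | some _ => st
  else
    match st.1 with
    | none => st
    | some s => (none, st.2 ++ [(s, px.1)])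

def zero_values_indices_alt (diffs : List Int) : List (Int × Int) :=
  match (PySem.List.enumerate diffs 0).foldl zviStep (none, []) with
  | (none, out) => out
  | (some s, out) => out ++ [(s, (diffs.length : Int))]

-- ===== PRECONDITION & SPEC =====
def Spec_zero_values_indices (diffs : List Int) (out : List (Int × Int)) : Prop := out = zero_values_indices_alt diffs
instance (diffs : List Int) (out : List (Int × Int)) : Decidable (Spec_zero_values_indices diffs out) := by unfold Spec_zero_values_indices; infer_instance

-- ===== CLAIM (what is proved, stated in full; the proofs are below) =====
def Claim_equal_zero_values_indices : Prop := ∀ (diffs : List Int), Dom_zero_values_indices diffs → Spec_zero_values_indices diffs (zero_values_indices diffs)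

-- ===== LEMMAS AND PROOFS =====

-- abstract state machine (indices as Int), the common semantics of both ports
def zviSM (xs : List Int) (k : Int) (st : Option Int) : List (Int × Int) :=
  match xs, st with
  | [], none => []
  | [], some s => [(s, k)]
  | x :: xs, none => if x = 0 then zviSM xs (k + 1) (some k) else zviSM xs (k + 1) none
  | x :: xs, some s => if x = 0 then zviSM xs (k + 1) (some s) else (s, k) :: zviSM xs (k + 1) none

-- B's fold (plus the final flush at index k + xs.length) computes the state machine
theorem foldl_zviStep_eq (xs : List Int) (k : Int) (st : Option Int) (acc : List (Int × Int)) :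
    (match ((PySem.List.enumerate xs k).foldl zviStep (st, acc)) with
      | (none, out) => out
      | (some s, out) => out ++ [(s, k + xs.length)]) = acc ++ zviSM xs k st := by
  induction xs generalizing k st acc with
  | nil =>
    cases st <;> simp [PySem.List.enumerate_nil, zviSM]
  | cons x xs ih =>
    rw [PySem.List.enumerate_cons, List.foldl_cons]
    have hlen : k + ((x :: xs).length : Int) = (k + 1) + (xs.length : Int) := by
      simp [List.length_cons]; ring
    by_cases hx : x = 0
    · cases st with
      | none =>
        rw [show zviStep (none, acc) (k, x) = (some k, acc) from by simp [zviStep, hx],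
          show zviSM (x :: xs) k none = zviSM xs (k + 1) (some k) from by simp [zviSM, hx],
          hlen, ih]
      | some s =>
        rw [show zviStep (some s, acc) (k, x) = (some s, acc) from by simp [zviStep, hx],
          show zviSM (x :: xs) k (some s) = zviSM xs (k + 1) (some s) from by simp [zviSM, hx],
          hlen, ih]
    · cases st with
      | none =>
        rw [show zviStep (none, acc) (k, x) = (none, acc) from by simp [zviStep, hx],
          show zviSM (x :: xs) k none = zviSM xs (k + 1) none from by simp [zviSM, hx],
          hlen, ih]
      | some s =>
        rw [show zviStep (some s, acc) (k, x) = (none, acc ++ [(s, k)]) from by simp [zviStep, hx],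
          show zviSM (x :: xs) k (some s) = (s, k) :: zviSM xs (k + 1) none from by simp [zviSM, hx],
          hlen, ih, List.append_assoc]
        simp

theorem zviInner_step (diffs : List Int) (i : Nat) (hi : i < diffs.length) (h0 : diffs[i] = 0) :
    zviInner diffs i = zviInner diffs (i + 1) := by
  rw [zviInner]
  simp [hi, h0]

theorem zviInner_stop_ge (diffs : List Int) (i : Nat) (hge : diffs.length ≤ i) :
    zviInner diffs i = i := by
  rw [zviInner]; simp [Nat.not_lt.mpr hge]

theorem zviInner_stop_ne (diffs : List Int) (i : Nat) (hi : i < diffs.length)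
    (h0 : diffs[i] ≠ 0) : zviInner diffs i = i := by
  rw [zviInner]
  simp [hi, h0]

-- A's loops compute the state machine, proved by fuel induction on diffs.length - i
theorem zviOuter_eq_SM (diffs : List Int) (m : Nat) :
    ∀ i : Nat, diffs.length - i ≤ m →
      (zviOuter diffs i = zviSM (diffs.drop i) (i : Int) none ∧
       ∀ s : Int, i ≤ diffs.length →
         zviSM (diffs.drop i) (i : Int) (some s) =
           (s, (zviInner diffs i : Int)) :: zviOuter diffs (zviInner diffs i + 1)) := by
  induction m with
  | zero =>
    intro i hle
    have hge : diffs.length ≤ i := by omega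
    have hdrop : diffs.drop i = [] := List.drop_eq_nil_of_le hge
    constructor
    · rw [zviOuter]; simp [hdrop, zviSM, Nat.not_lt.mpr hge]
    · intro s hle2
      have hin : zviInner diffs i = i := zviInner_stop_ge diffs i hge
      rw [hdrop, hin]
      simp [zviSM]
      rw [zviOuter]
      simp [show ¬ i + 1 < diffs.length by omega]
  | succ m ih =>
    intro i hle
    by_cases hi : i < diffs.length
    · have hb : diffs[i]? = some diffs[i] := List.getElem?_eq_getElem hi
      have hdrop : diffs.drop i = diffs[i] :: diffs.drop (i + 1) :=
        List.drop_eq_getElem_cons hi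
      have hcast : ((i : Int) + 1) = ((i + 1 : Nat) : Int) := by push_cast; ring
      have ih' := ih (i + 1) (by omega)
      constructor
      · rw [zviOuter]
        by_cases h0 : diffs[i] = 0
        · have h0b : diffs[i]! = 0 := by
            simp [List.getElem!_eq_getElem?_getD, hb, h0]
          simp only [hi, dif_pos, h0b, if_pos]
          rw [hdrop,
            show zviSM (diffs[i] :: diffs.drop (i + 1)) (i : Int) none
              = zviSM (diffs.drop (i + 1)) ((i : Int) + 1) (some (i : Int)) from by
                simp [zviSM, h0],
            hcast, ih'.2 (i : Int) (by omega), ← zviInner_step diffs i hi h0]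
        · have h0b : ¬ diffs[i]! = 0 := by
            simp [List.getElem!_eq_getElem?_getD, hb, h0]
          simp only [hi, dif_pos, if_neg h0b]
          rw [hdrop,
            show zviSM (diffs[i] :: diffs.drop (i + 1)) (i : Int) none
              = zviSM (diffs.drop (i + 1)) ((i : Int) + 1) none from by simp [zviSM, h0],
            hcast]
          exact ih'.1.symm ▸ rfl
      · intro s _
        by_cases h0 : diffs[i] = 0
        · rw [hdrop,
            show zviSM (diffs[i] :: diffs.drop (i + 1)) (i : Int) (some s)
              = zviSM (diffs.drop (i + 1)) ((i : Int) + 1) (some s) from by simp [zviSM, h0],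
            hcast, ih'.2 s (by omega), ← zviInner_step diffs i hi h0]
        · have hin : zviInner diffs i = i := zviInner_stop_ne diffs i hi h0
          rw [hdrop,
            show zviSM (diffs[i] :: diffs.drop (i + 1)) (i : Int) (some s)
              = (s, (i : Int)) :: zviSM (diffs.drop (i + 1)) ((i : Int) + 1) none from by
                simp [zviSM, h0],
            hcast, hin, ih'.1]
    · have hge : diffs.length ≤ i := by omega
      have hdrop : diffs.drop i = [] := List.drop_eq_nil_of_le hge
      constructor
      · rw [zviOuter]; simp [hdrop, zviSM, hi]
      · intro s hle2
        have hin : zviInner diffs i = i := zviInner_stop_ge diffs i hge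
        rw [hdrop, hin]
        simp [zviSM]
        rw [zviOuter]
        simp [show ¬ i + 1 < diffs.length by omega]

-- ===== VERDICT (by name: the statement is the Claim_ definition above) =====
theorem zero_values_indices_spec : Claim_equal_zero_values_indices := by
  intro diffs _
  unfold Spec_zero_values_indices zero_values_indices zero_values_indices_alt
  have hA := (zviOuter_eq_SM diffs diffs.length 0 (by omega)).1
  have hB := foldl_zviStep_eq diffs 0 none []
  simp only [List.drop_zero, Nat.cast_zero] at hA
  simp only [List.nil_append, zero_add] at hB
  rw [hA, ← hB]
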